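-- pv_equiv track=rewrite | github.com/dmishin/js-revca | tools/rle.py | to_rle
-- ===== SOURCE A (Python) =====
-- def to_rle(cells):
--     """COnvert sorted (by y) list of alive cells to RLE encoding"""
--     x0, y0 = lower_bound(cells)
--     cells = [(x-x0, y-y0) for (x,y) in cells]
--     rle = [""]
--     count = [0]
--
--     def appendNumber(n, c):
--         if n > 1:
--             rle.append( str(n))
--         rle.append(c)
--
--     def endWritingBlock():
--       if count[0] > 0:
--         appendNumber(count[0], "o")
--         count[0] = 0
--
--     x = -1
--     y = 0
--
--     for i, (xi, yi) in enumerate(cells):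
--       dy = yi - y
--       if dy < 0:
--           raise ValueError( "Cell list are not sorted by Y"  )
--
--       if dy > 0: #different row
--         endWritingBlock()
--         appendNumber( dy, "$")
--         x = -1
--         y = yi
--       dx = xi - x
--       if dx <= 0:
--           raise ValueError( "Cell list is not sorted by X"  )
--       if dx == 1:
--         count[0] += 1 #continue current horizontal line
--       elif dx > 1: #line broken
--         endWritingBlock()
--         appendNumber( dx - 1, "b")  #write whitespace before next block
--         count[0] = 1 #and remember the current cell
--       x = xi
--     endWritingBlock()
--     return "".join(rle)
--
-- def lower_bound(cells ):
--     xmin = min( x for x,y in cells )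
--     ymin = min( y for x,y in cells )
--     def even_floor(x):
--         return x - (x%2)
--     return (even_floor(xmin), even_floor(ymin))
-- ===== SOURCE B (Python) =====
-- # B: geometric re-implementation: validate the documented sort order, rasterise
-- # the cells into a set, find each maximal horizontal segment by neighbourhood
-- # membership ((x-1,y) absent marks a start, extend while (x+n,y) present), then
-- # render the sorted segments as RLE tokens (computed from the cell SET, not
-- # from consecutive deltas of the input sequence).
-- def _tok(n, c):
--     return (str(n) if n > 1 else "") + c
--
--
-- def to_rle(cells):
--     for a, b in zip(cells, cells[1:]):
--         if b[1] < a[1]: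
--             raise ValueError("Cell list are not sorted by Y")
--         if b[1] == a[1] and b[0] <= a[0]:
--             raise ValueError("Cell list is not sorted by X")
--     x0 = min(x for x, y in cells)
--     y0 = min(y for x, y in cells)
--     x0 -= x0 % 2
--     y0 -= y0 % 2
--     alive = {(x - x0, y - y0) for (x, y) in cells}
--     runs = []
--     for (y, x) in sorted((y, x) for (x, y) in alive):
--         if (x - 1, y) not in alive:
--             n = 1
--             while (x + n, y) in alive:
--                 n += 1
--             runs.append((y, x, n))
--     out = []
--     py, px = 0, -1
--     for y, xs, n in runs:
--         if y != py:
--             out.append(_tok(y - py, "$"))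
--             py, px = y, -1
--         if xs - px > 1:
--             out.append(_tok(xs - px - 1, "b"))
--         out.append(_tok(n, "o"))
--         px = xs + n - 1
--     return "".join(out)
-- ===== Notes on version B (the rewrite author's own statement) =====
-- stated objective: alternative
-- what changed: B abandons A's sequential token-emitting state machine: it rasterises the cells into a set, finds each maximal horizontal segment geometrically by neighbourhood membership ((x-1,y) absent marks a segment start, extend while (x+n,y) is present), sorts the segments and renders them as RLE tokens, so the result is computed from the cell set rather than from consecutive deltas of the input sequence.
import Mathlib
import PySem

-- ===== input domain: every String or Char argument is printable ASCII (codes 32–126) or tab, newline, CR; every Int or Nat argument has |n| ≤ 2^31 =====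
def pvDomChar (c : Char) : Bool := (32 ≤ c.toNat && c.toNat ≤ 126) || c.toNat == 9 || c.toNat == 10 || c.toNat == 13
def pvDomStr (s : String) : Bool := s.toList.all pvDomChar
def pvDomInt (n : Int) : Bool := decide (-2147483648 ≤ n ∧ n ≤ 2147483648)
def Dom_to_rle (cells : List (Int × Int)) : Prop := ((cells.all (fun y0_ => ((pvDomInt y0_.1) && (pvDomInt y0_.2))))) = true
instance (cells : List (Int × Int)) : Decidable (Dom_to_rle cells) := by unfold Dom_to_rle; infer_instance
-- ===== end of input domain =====

-- B replaces A's sequential token-emitting state machine by a geometric pass: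
-- rasterise the cells into a set, find maximal horizontal segments by
-- neighbourhood membership, sort the segments, render them as RLE tokens.

-- ===== PORT A =====
def pvEvenFloor (x : Int) : Int := x - PySem.Int.mod x 2

def pvLowerBound (cells : List (Int × Int)) : Int × Int :=
  (pvEvenFloor ((PySem.List.min? (cells.map Prod.fst) (fun v => v)).getD 0),
   pvEvenFloor ((PySem.List.min? (cells.map Prod.snd) (fun v => v)).getD 0))

def pvA_appendNumber (rle : List String) (n : Int) (c : String) : List String :=
  (if n > 1 then rle ++ [PySem.Int.toStr n] else rle) ++ [c]

def pvA_endBlock (rle : List String) (count : Int) : List String × Int :=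
  if count > 0 then (pvA_appendNumber rle count "o", 0) else (rle, count)

-- state: (rle, count, x, y); none = ValueError already raised
def pvA_step (st : Option (List String × Int × Int × Int)) (cell : Int × Int) :
    Option (List String × Int × Int × Int) :=
  match st with
  | none => none
  | some (rle, count, x, y) =>
    let dy := cell.2 - y
    if dy < 0 then none
    else
      let s2 : List String × Int × Int × Int :=
        if dy > 0 then
          let e := pvA_endBlock rle count
          (pvA_appendNumber e.1 dy "$", e.2, (-1 : Int), cell.2)
        else (rle, count, x, y)
      let dx := cell.1 - s2.2.2.1
      if dx ≤ 0 then none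
      else if dx = 1 then some (s2.1, s2.2.1 + 1, cell.1, s2.2.2.2)
      else
        let e := pvA_endBlock s2.1 s2.2.1
        some (pvA_appendNumber e.1 (dx - 1) "b", 1, cell.1, s2.2.2.2)

def to_rle (cells : List (Int × Int)) : String :=
  let p := pvLowerBound cells
  let shifted := cells.map (fun c => (c.1 - p.1, c.2 - p.2))
  match shifted.foldl pvA_step (some ([""], 0, -1, 0)) with
  | none => ""   -- ValueError (unsorted input); excluded by Pre_to_rle
  | some st => PySem.Str.join "" (pvA_endBlock st.1 st.2.1).1

-- ===== PORT B =====
def pvB_tok (n : Int) (c : String) : String :=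
  (if n > 1 then PySem.Int.toStr n else "") ++ c

-- while (x + n, y) in alive: n += 1 — fuel = |alive| bounds the loop (a run
-- has at most |alive| cells), so the port is exact
def pvB_runLen (alive : PySem.Set (Int × Int)) (x y : Int) : Nat → Int → Int
  | 0, n => n
  | fuel + 1, n =>
      if PySem.Set.contains alive (x + n, y) then pvB_runLen alive x y fuel (n + 1)
      else n

-- loop body: p = (y, x); a segment starts at x iff (x-1, y) is dead
def pvB_step (alive : PySem.Set (Int × Int)) (rs : List (Int × Int × Int))
    (p : Int × Int) : List (Int × Int × Int) :=
  if PySem.Set.contains alive (p.2 - 1, p.1) then rs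
  else rs ++ [(p.1, p.2, pvB_runLen alive p.2 p.1 alive.length 1)]

def pvB_runs (alive : PySem.Set (Int × Int)) (s : List (Int × Int)) :
    List (Int × Int × Int) :=
  s.foldl (pvB_step alive) []

-- render one segment r = (y, xs, n); state (out, py, px)
def pvB_emit (st : List String × Int × Int) (r : Int × Int × Int) :
    List String × Int × Int :=
  let s1 := if r.1 ≠ st.2.1 then (st.1 ++ [pvB_tok (r.1 - st.2.1) "$"], r.1, (-1 : Int))
            else st
  let out := if r.2.1 - s1.2.2 > 1 then s1.1 ++ [pvB_tok (r.2.1 - s1.2.2 - 1) "b"]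
             else s1.1
  (out ++ [pvB_tok r.2.2 "o"], s1.2.1, r.2.1 + r.2.2 - 1)

-- upfront validation of the documented 'sorted by (y, x)' contract: B raises
-- the same ValueError as A there ("" stands for the raise, outside Pre_to_rle)
def pvB_sorted (cells : List (Int × Int)) : Bool :=
  (cells.zip cells.tail).all
    (fun q => !(decide (q.2.2 < q.1.2)) &&
      !(q.2.2 == q.1.2 && decide (q.2.1 ≤ q.1.1)))

def to_rle_alt (cells : List (Int × Int)) : String :=
  if ¬ pvB_sorted cells then ""   -- ValueError (unsorted); excluded by Pre_to_rle
  else match PySem.List.min? (cells.map Prod.fst) (fun v => v),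
        PySem.List.min? (cells.map Prod.snd) (fun v => v) with
  | some xm, some ym =>
      let x0 := xm - PySem.Int.mod xm 2
      let y0 := ym - PySem.Int.mod ym 2
      let alive : PySem.Set (Int × Int) :=
        PySem.Set.ofList (cells.map (fun c => (c.1 - x0, c.2 - y0)))
      let s := PySem.List.sorted2 (alive.map (fun c => (c.2, c.1))) Prod.fst Prod.snd
      PySem.Str.join "" ((pvB_runs alive s).foldl pvB_emit ([], 0, -1)).1
  | _, _ => ""   -- min() of an empty list: ValueError, outside Pre_to_rle

-- ===== PRECONDITION & SPEC =====
-- Pre_ excludes exactly the inputs on which A raises ValueError: the empty list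
-- (min() of an empty sequence) and lists not strictly sorted by (y, x).
def Pre_to_rle (cells : List (Int × Int)) : Prop :=
  cells ≠ [] ∧
    List.IsChain (fun a b : Int × Int => a.2 < b.2 ∨ (a.2 = b.2 ∧ a.1 < b.1)) cells
instance (cells : List (Int × Int)) : Decidable (Pre_to_rle cells) := by
  unfold Pre_to_rle; infer_instance

def pvWitness_to_rle : (List (Int × Int)) := [(0, 0), (2, 0), (0, 1)]

def Spec_to_rle (cells : List (Int × Int)) (out : String) : Prop := out = to_rle_alt cells
instance (cells : List (Int × Int)) (out : String) : Decidable (Spec_to_rle cells out) := by unfold Spec_to_rle; infer_instance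

-- ===== CLAIM (what is proved, stated in full; the proofs are below) =====
def Claim_equal_to_rle : Prop := ∀ (cells : List (Int × Int)), Dom_to_rle cells → Pre_to_rle cells → Spec_to_rle cells (to_rle cells)

-- ===== LEMMAS AND PROOFS =====

-- join "" at the List Char level
def JL (l : List String) : List Char := (l.map String.toList).flatten

lemma join_eq_ofList (l : List String) :
    PySem.Str.join "" l = String.ofList (JL l) := by
  have h : ∀ parts : List (List Char),
      PySem.Chars.join [] parts = parts.flatten := by
    intro parts
    induction parts with
    | nil => rfl
    | cons a t ih =>
      cases t with
      | nil => simp [PySem.Chars.join, List.intercalate]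
      | cons b t' =>
        rw [PySem.Chars.join_cons_cons, ih]
        simp
  simp [PySem.Str.join, JL, h]

@[simp] lemma JL_append (a b : List String) : JL (a ++ b) = JL a ++ JL b := by
  simp [JL]

@[simp] lemma JL_singleton (s : String) : JL [s] = s.toList := by
  simp [JL]

@[simp] lemma JL_nil : JL [] = [] := rfl

@[simp] lemma JL_cons (s : String) (l : List String) :
    JL (s :: l) = s.toList ++ JL l := by simp [JL]

-- equality of A-states by components
lemma stEq (t : List String) (a b c a' b' c' : Int)
    (h1 : a = a') (h2 : b = b') (h3 : c = c') :
    (some (t, a, b, c) : Option (List String × Int × Int × Int))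
      = some (t, a', b', c') := by rw [h1, h2, h3]

lemma JL_appendNumber (l : List String) (n : Int) (ch : String) :
    JL (pvA_appendNumber l n ch) = JL l ++ (pvB_tok n ch).toList := by
  by_cases h : n > 1 <;>
    simp [pvA_appendNumber, pvB_tok, h, JL, String.toList_append]

lemma endBlock_nonpos (t : List String) (c : Int) (h : ¬ 0 < c) :
    pvA_endBlock t c = (t, c) := by simp [pvA_endBlock, h]

lemma endBlock_pos (t : List String) (c : Int) (h : 0 < c) :
    pvA_endBlock t c = (pvA_appendNumber t c "o", 0) := by
  simp [pvA_endBlock, h]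

lemma stepA_same_row_adj (t1 : List String) (c px : Int) (d : Int × Int)
    (hadj : d.1 = px + 1) :
    pvA_step (some (t1, c, px, d.2)) d = some (t1, c + 1, d.1, d.2) := by
  have h3 : d.1 - px = 1 := by omega
  simp [pvA_step, h3]

lemma stepA_same_row_gap (t1 : List String) (c px : Int) (d : Int × Int)
    (hgap : px + 1 < d.1) :
    pvA_step (some (t1, c, px, d.2)) d =
      some (pvA_appendNumber (pvA_endBlock t1 c).1 (d.1 - px - 1) "b",
        1, d.1, d.2) := by
  have h2 : ¬ (d.1 - px ≤ 0) := by omega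
  have h3 : ¬ (d.1 - px = 1) := by omega
  simp [pvA_step, h2, h3]

lemma splitStep (t1 : List String) (c px y : Int) (d : Int × Int)
    (hdy : 0 < d.2 - y) (hc : 0 ≤ c) :
    pvA_step (some (t1, c, px, y)) d =
      pvA_step (some (pvA_appendNumber (pvA_endBlock t1 c).1 (d.2 - y) "$",
        0, -1, d.2)) d := by
  have he2 : (pvA_endBlock t1 c).2 = 0 := by
    unfold pvA_endBlock; split_ifs with h
    · rfl
    · simp; omega
  have h0 : ¬ (d.2 - y < 0) := by omega
  have h3 : y < d.2 := by omega
  simp [pvA_step, h0, h3, he2]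

-- generic chain/pairwise helpers
lemma chain_head_rel {α : Type} {R : α → α → Prop}
    (ht : ∀ a b c, R a b → R b c → R a c) :
    ∀ (l : List α) (a : α), List.IsChain R (a :: l) → ∀ b ∈ l, R a b := by
  intro l
  induction l with
  | nil => intro a _ b hb; simp at hb
  | cons c l' ih =>
    intro a hch b hb
    obtain ⟨hac, hch'⟩ := List.isChain_cons_cons.mp hch
    rcases List.mem_cons.mp hb with h | h
    · subst h; exact hac
    · exact ht a c b hac (ih c hch' b h)

lemma pairwise_of_chain {α : Type} {R : α → α → Prop}
    (ht : ∀ a b c, R a b → R b c → R a c) :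
    ∀ (l : List α), List.IsChain R l → List.Pairwise R l := by
  intro l
  induction l with
  | nil => intro _; simp
  | cons a l' ih =>
    intro hch
    refine List.pairwise_cons.mpr ⟨chain_head_rel ht l' a hch, ih ?_⟩
    cases l' with
    | nil => simp
    | cons b t => exact (List.isChain_cons_cons.mp hch).2

lemma pairwise_rel_of_mem {α : Type} {R : α → α → Prop} :
    ∀ (l : List α), List.Pairwise R l → ∀ a ∈ l, ∀ b ∈ l, a = b ∨ R a b ∨ R b a := by
  intro l
  induction l with
  | nil => intro _ a ha; simp at ha
  | cons x l' ih =>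
    intro hp a ha b hb
    obtain ⟨hx, hp'⟩ := List.pairwise_cons.mp hp
    rcases List.mem_cons.mp ha with ha | ha <;> rcases List.mem_cons.mp hb with hb | hb
    · left; rw [ha, hb]
    · right; left; rw [ha]; exact hx b hb
    · right; right; rw [hb]; exact hx a ha
    · exact ih hp' a ha b hb

-- ===== the runs decomposition =====
def pvExpand (r : Int × Int × Int) : List (Int × Int) :=
  (List.range r.2.2.toNat).map (fun k : Nat => (r.2.1 + (k : Int), r.1))

def RunLt (r s : Int × Int × Int) : Prop :=
  r.1 < s.1 ∨ (r.1 = s.1 ∧ r.2.1 + r.2.2 < s.2.1)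

def Lex2 (a b : Int × Int) : Prop := a.2 < b.2 ∨ (a.2 = b.2 ∧ a.1 < b.1)

lemma lex2_trans : ∀ a b c : Int × Int, Lex2 a b → Lex2 b c → Lex2 a c := by
  intro a b c h1 h2; unfold Lex2 at *
  rcases h1 with h1 | ⟨h1, h1'⟩ <;> rcases h2 with h2 | ⟨h2, h2'⟩ <;> omega

def pvRunsGo (y xs n : Int) : List (Int × Int) → List (Int × Int × Int)
  | [] => [(y, xs, n)]
  | d :: rest =>
      if d.2 = y ∧ d.1 = xs + n then pvRunsGo y xs (n + 1) rest
      else (y, xs, n) :: pvRunsGo d.2 d.1 1 rest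

lemma runs_head_rel : ∀ (l : List (Int × Int × Int)) (a : Int × Int × Int),
    (∀ r ∈ l, 1 ≤ r.2.2) → List.IsChain RunLt (a :: l) → ∀ b ∈ l, RunLt a b := by
  intro l
  induction l with
  | nil => intro a _ _ b hb; simp at hb
  | cons c l' ih =>
    intro a hn hch b hb
    obtain ⟨hac, hch'⟩ := List.isChain_cons_cons.mp hch
    rcases List.mem_cons.mp hb with h | h
    · subst h; exact hac
    · have hcb := ih c (fun r hr => hn r (by simp [hr])) hch' b h
      have hc1 : 1 ≤ c.2.2 := hn c (by simp)
      unfold RunLt at *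
      rcases hac with h1 | ⟨h1, h1'⟩ <;> rcases hcb with h2 | ⟨h2, h2'⟩ <;> omega

lemma runs_pairwise : ∀ (l : List (Int × Int × Int)),
    (∀ r ∈ l, 1 ≤ r.2.2) → List.IsChain RunLt l → List.Pairwise RunLt l := by
  intro l
  induction l with
  | nil => intro _ _; simp
  | cons a l' ih =>
    intro hn hch
    refine List.pairwise_cons.mpr
      ⟨runs_head_rel l' a (fun r hr => hn r (by simp [hr])) hch, ih (fun r hr => hn r (by simp [hr])) ?_⟩
    cases l' with
    | nil => simp
    | cons b t => exact (List.isChain_cons_cons.mp hch).2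

lemma expand_cons (y xs n : Int) (h : 1 ≤ n) :
    pvExpand (y, xs, n) =
      (xs, y) :: (List.range (n - 1).toNat).map (fun k : Nat => (xs + ((k : Int) + 1), y)) := by
  have hn : n.toNat = (n - 1).toNat + 1 := by omega
  rw [pvExpand]
  simp only [hn, List.range_succ_eq_map, List.map_cons, List.map_map]
  refine congrArg₂ List.cons (by simp) ?_
  apply List.map_congr_left
  intro k _
  simp only [Function.comp_apply, Prod.mk.injEq]
  refine ⟨?_, trivial⟩
  push_cast; ring

-- the core structural facts about pvRunsGo
lemma runsGo_spec : ∀ (rest : List (Int × Int)) (y xs n : Int),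
    1 ≤ n →
    List.IsChain Lex2 ((xs + n - 1, y) :: rest) →
    ((pvRunsGo y xs n rest).flatMap pvExpand
        = (List.range n.toNat).map (fun k : Nat => (xs + (k : Int), y)) ++ rest) ∧
    List.IsChain RunLt (pvRunsGo y xs n rest) ∧
    (∃ m tl, n ≤ m ∧ pvRunsGo y xs n rest = (y, xs, m) :: tl) ∧
    (∀ r ∈ pvRunsGo y xs n rest, 1 ≤ r.2.2) := by
  intro rest
  induction rest with
  | nil =>
    intro y xs n hn _
    refine ⟨by simp [pvRunsGo, pvExpand], by simp [pvRunsGo], ⟨n, [], le_rfl, rfl⟩, ?_⟩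
    intro r hr; simp [pvRunsGo] at hr; subst hr; exact hn
  | cons d rest' ih =>
    intro y xs n hn hch
    obtain ⟨hlex, hch'⟩ := List.isChain_cons_cons.mp hch
    by_cases hext : d.2 = y ∧ d.1 = xs + n
    · obtain ⟨hd2, hd1⟩ := hext
      have hde : (xs + (n + 1) - 1, y) = d := by
        have : xs + (n + 1) - 1 = d.1 := by omega
        rw [this, ← hd2]
      have hch2 : List.IsChain Lex2 ((xs + (n + 1) - 1, y) :: rest') := by
        rw [hde]; exact hch'
      obtain ⟨hflat, hcr, hhead, hall⟩ := ih y xs (n + 1) (by omega) hch2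
      have hrw : pvRunsGo y xs n (d :: rest') = pvRunsGo y xs (n + 1) rest' := by
        simp [pvRunsGo, hd2, hd1]
      refine ⟨?_, by rw [hrw]; exact hcr, ?_, ?_⟩
      · rw [hrw, hflat]
        have hr1 : (List.range (n + 1).toNat).map (fun k : Nat => (xs + (k : Int), y))
            = (List.range n.toNat).map (fun k : Nat => (xs + (k : Int), y)) ++ [d] := by
          have h1 : (n + 1).toNat = n.toNat + 1 := by omega
          rw [h1, List.range_succ, List.map_append]
          simp only [List.map_cons, List.map_nil]
          congr 2
          have : xs + (n.toNat : Int) = d.1 := by omega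
          rw [this, ← hd2]
        rw [hr1]; simp
      · obtain ⟨m, tl, hm, htl⟩ := hhead
        exact ⟨m, tl, by omega, by rw [hrw]; exact htl⟩
      · intro r hr; rw [hrw] at hr; exact hall r hr
    · have hde : (d.1 + 1 - 1, d.2) = d := by
        have : d.1 + 1 - 1 = d.1 := by omega
        rw [this]
      have hch2 : List.IsChain Lex2 ((d.1 + 1 - 1, d.2) :: rest') := by
        rw [hde]; exact hch'
      obtain ⟨hflat, hcr, hhead, hall⟩ := ih d.2 d.1 1 le_rfl hch2
      have hrw : pvRunsGo y xs n (d :: rest') = (y, xs, n) :: pvRunsGo d.2 d.1 1 rest' := by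
        simp only [pvRunsGo, if_neg hext]
      have hRd : ∀ m', RunLt (y, xs, n) (d.2, d.1, m') := by
        intro m'
        unfold RunLt; unfold Lex2 at hlex; simp only at hlex ⊢
        rcases hlex with h | ⟨h, h'⟩
        · left; omega
        · right
          refine ⟨by omega, ?_⟩
          rcases (by omega : d.1 = xs + n ∨ xs + n < d.1) with he | he
          · exact absurd ⟨by omega, he⟩ hext
          · exact he
      refine ⟨?_, ?_, ⟨n, _, le_rfl, hrw⟩, ?_⟩
      · rw [hrw, List.flatMap_cons, hflat]
        have he : pvExpand (y, xs, n)
            = (List.range n.toNat).map (fun k : Nat => (xs + (k : Int), y)) := rfl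
        rw [he]
        have h1 : (List.range (1 : Int).toNat).map (fun k : Nat => (d.1 + (k : Int), d.2)) = [d] := by
          simp
        rw [h1]; simp
      · rw [hrw]
        obtain ⟨m, tl, hm, htl⟩ := hhead
        rw [htl]
        exact List.isChain_cons_cons.mpr ⟨hRd m, by rw [← htl]; exact hcr⟩
      · intro r hr
        rw [hrw] at hr
        rcases List.mem_cons.mp hr with h | h
        · subst h; exact hn
        · exact hall r h

lemma mem_expand (a b : Int) (r : Int × Int × Int) :
    (a, b) ∈ pvExpand r ↔ b = r.1 ∧ r.2.1 ≤ a ∧ a < r.2.1 + r.2.2 := by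
  simp only [pvExpand, List.mem_map, List.mem_range]
  constructor
  · rintro ⟨k, hk, he⟩
    have h1 : r.2.1 + (k : Int) = a := congrArg Prod.fst he
    have h2 : r.1 = b := congrArg Prod.snd he
    exact ⟨h2.symm, by omega, by omega⟩
  · rintro ⟨hb, h1, h2⟩
    refine ⟨(a - r.2.1).toNat, by omega, ?_⟩
    have h : r.2.1 + ((a - r.2.1).toNat : Int) = a := by omega
    rw [h, hb]

lemma expand_sublist : ∀ (rs : List (Int × Int × Int)) (r : Int × Int × Int),
    r ∈ rs → (pvExpand r).Sublist (rs.flatMap pvExpand) := by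
  intro rs
  induction rs with
  | nil => intro r hr; simp at hr
  | cons a t ih =>
    intro r hr
    rw [List.flatMap_cons]
    rcases List.mem_cons.mp hr with h | h
    · subst h; exact List.sublist_append_left _ _
    · exact (ih r h).trans (List.sublist_append_right _ _)

-- adjacency: n consecutive cells just extend the counter
lemma adjFold : ∀ (m : Nat) (t : List String) (c x y : Int),
    ((List.range m).map (fun k : Nat => (x + ((k : Int) + 1), y))).foldl pvA_step
        (some (t, c, x, y)) = some (t, c + m, x + m, y) := by
  intro m
  induction m with
  | zero => intro t c x y; simp
  | succ m ih =>
    intro t c x y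
    rw [List.range_succ, List.map_append, List.foldl_append, ih]
    simp only [List.map_cons, List.map_nil, List.foldl_cons, List.foldl_nil]
    have hstep := stepA_same_row_adj t (c + m) (x + m) (x + ((m : Int) + 1), y) (by simp; ring)
    simp only at hstep
    rw [hstep]
    congr 1
    refine Prod.ext rfl (Prod.ext ?_ (Prod.ext ?_ rfl)) <;> push_cast <;> ring

-- the while loop computes the segment length
lemma runLen_spec (alive : PySem.Set (Int × Int)) (xs y n : Int)
    (hmem : ∀ k : Int, 0 ≤ k → k < n → (xs + k, y) ∈ alive)
    (hend : (xs + n, y) ∉ alive) (hn : 1 ≤ n) :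
    ∀ (fuel : Nat) (m : Int), 1 ≤ m → m ≤ n → (n - m).toNat ≤ fuel →
      pvB_runLen alive xs y fuel m = n := by
  intro fuel
  induction fuel with
  | zero =>
    intro m _ h2 h3
    have : m = n := by omega
    simp [pvB_runLen, this]
  | succ fuel ih =>
    intro m h1 h2 h3
    by_cases hm : m = n
    · have hc : ¬ (PySem.Set.contains alive (xs + m, y) = true) := by
        rw [hm]
        intro hc
        exact hend ((PySem.Set.contains_iff _ _).mp hc)
      rw [pvB_runLen, if_neg hc, hm]
    · have hc : PySem.Set.contains alive (xs + m, y) = true :=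
        (PySem.Set.contains_iff _ _).mpr (hmem m (by omega) (by omega))
      rw [pvB_runLen, if_pos hc]
      exact ih (m + 1) (by omega) (by omega) (by omega)

lemma contains_false_of_not_mem (alive : PySem.Set (Int × Int)) (p : Int × Int)
    (h : p ∉ alive) : PySem.Set.contains alive p = false := by
  cases hc : PySem.Set.contains alive p
  · rfl
  · exact absurd ((PySem.Set.contains_iff _ _).mp hc) h

lemma skip_all (alive : PySem.Set (Int × Int)) :
    ∀ (l : List (Int × Int)) (acc : List (Int × Int × Int)),
    (∀ p ∈ l, PySem.Set.contains alive (p.2 - 1, p.1) = true) →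
    l.foldl (pvB_step alive) acc = acc := by
  intro l
  induction l with
  | nil => intro acc _; rfl
  | cons p t ih =>
    intro acc h
    rw [List.foldl_cons]
    have hp := h p (by simp)
    rw [pvB_step, if_pos hp]
    exact ih acc (fun q hq => h q (by simp [hq]))

-- the B scan over the expanded segments returns exactly the segments
lemma runsB_fold (alive : PySem.Set (Int × Int)) :
    ∀ (rs : List (Int × Int × Int)) (acc : List (Int × Int × Int)),
    (∀ r ∈ rs, 1 ≤ r.2.2 ∧ (r.2.1 - 1, r.1) ∉ alive ∧
      (∀ k : Int, 0 ≤ k → k < r.2.2 → (r.2.1 + k, r.1) ∈ alive) ∧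
      (r.2.1 + r.2.2, r.1) ∉ alive ∧ (r.2.2 - 1).toNat ≤ alive.length) →
    ((rs.flatMap pvExpand).map (fun c => (c.2, c.1))).foldl (pvB_step alive) acc
      = acc ++ rs := by
  intro rs
  induction rs with
  | nil => intro acc _; simp
  | cons r rs' ih =>
    intro acc hfacts
    obtain ⟨y, xs, n⟩ := r
    obtain ⟨hn, hstart, hin, hend, hfuel⟩ := hfacts (y, xs, n) (by simp)
    rw [List.flatMap_cons, List.map_append, List.foldl_append]
    have hexp : pvExpand (y, xs, n)
        = (xs, y) :: (List.range (n - 1).toNat).map (fun k : Nat => (xs + ((k : Int) + 1), y)) :=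
      expand_cons y xs n hn
    simp only at hn hstart hin hend hfuel
    have hhead : ((pvExpand (y, xs, n)).map (fun c => (c.2, c.1))).foldl (pvB_step alive) acc
        = acc ++ [(y, xs, n)] := by
      rw [hexp, List.map_cons, List.foldl_cons]
      have h1 : pvB_step alive acc ((xs, y).2, (xs, y).1) = acc ++ [(y, xs, n)] := by
        have hcf : PySem.Set.contains alive (((xs, y).2, (xs, y).1).2 - 1, ((xs, y).2, (xs, y).1).1)
            = false := contains_false_of_not_mem alive _ hstart
        rw [pvB_step, hcf]
        simp only [Bool.false_eq_true, if_false]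
        have hlen : pvB_runLen alive xs y alive.length 1 = n :=
          runLen_spec alive xs y n hin hend hn alive.length 1 le_rfl hn (by omega)
        simp only at hlen ⊢
        rw [hlen]
      rw [h1]
      apply skip_all
      intro p hp
      simp only [List.mem_map, List.mem_range] at hp
      obtain ⟨k, ⟨a, ha, hak⟩, hkp⟩ := hp
      subst hak
      subst hkp
      apply (PySem.Set.contains_iff _ _).mpr
      have h : xs + ((a : Int) + 1) - 1 = xs + (a : Int) := by ring
      simp only [h]
      exact hin (a : Int) (by omega) (by omega)
    rw [hhead]
    rw [ih (acc ++ [(y, xs, n)]) (fun r hr => hfacts r (by simp [hr]))]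
    simp

-- A's state machine over the expanded segments = B's renderer over the segments
lemma AtoEmit : ∀ (rs : List (Int × Int × Int)) (t1 t2 : List String) (c px py : Int),
    JL (pvA_endBlock t1 c).1 = JL t2 → 0 ≤ c →
    List.IsChain RunLt rs →
    (∀ r ∈ rs, 1 ≤ r.2.2 ∧ 0 ≤ r.2.1 ∧ 0 ≤ r.1) →
    (∀ r ∈ rs.head?, py ≤ r.1 ∧ (r.1 = py → px < r.2.1 ∧ (c = 0 ∨ px + 1 < r.2.1))) →
    ∃ st, (rs.flatMap pvExpand).foldl pvA_step (some (t1, c, px, py)) = some st ∧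
      JL (pvA_endBlock st.1 st.2.1).1 = JL ((rs.foldl pvB_emit (t2, py, px)).1) := by
  intro rs
  induction rs with
  | nil =>
    intro t1 t2 c px py hJ _ _ _ _
    exact ⟨(t1, c, px, py), by simp, hJ⟩
  | cons r rs' ih =>
    intro t1 t2 c px py hJ hc hch hall hhead
    obtain ⟨y, xs, n⟩ := r
    obtain ⟨hn, hxs0, hy0⟩ := hall (y, xs, n) (by simp)
    obtain ⟨hpy, hsame⟩ := hhead (y, xs, n) (by simp)
    simp only at hpy hsame hn hxs0 hy0
    have hch' : List.IsChain RunLt rs' := by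
      cases rs' with
      | nil => simp
      | cons b t => exact (List.isChain_cons_cons.mp hch).2
    have hm : ((n - 1).toNat : Int) = n - 1 := by omega
    have hexp : pvExpand (y, xs, n)
        = (xs, y) :: (List.range (n - 1).toNat).map (fun k : Nat => (xs + ((k : Int) + 1), y)) :=
      expand_cons y xs n hn
    -- after processing this segment A's state is (T, n, xs + n - 1, y) with
    -- JL (endBlock T n) = JL t2' for B's t2'
    have key : ∃ T, (pvExpand (y, xs, n)).foldl pvA_step (some (t1, c, px, py))
          = some (T, n, xs + n - 1, y) ∧
        JL (pvA_endBlock T n).1 = JL ((pvB_emit (t2, py, px) (y, xs, n)).1) := by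
      by_cases hrow : y = py
      · -- same row
        obtain ⟨hpx, hdisj⟩ := hsame hrow
        subst hrow
        have hemit : (pvB_emit (t2, y, px) (y, xs, n)).1
            = (if xs - px > 1 then t2 ++ [pvB_tok (xs - px - 1) "b"] else t2)
                ++ [pvB_tok n "o"] := by
          simp [pvB_emit]
        by_cases hadj : xs = px + 1
        · have hc0 : c = 0 := by
            rcases hdisj with h | h
            · exact h
            · omega
          subst hc0
          have h1 := stepA_same_row_adj t1 0 px (xs, y) hadj
          refine ⟨t1, ?_, ?_⟩
          · rw [hexp, List.foldl_cons, h1, adjFold]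
            exact stEq _ _ _ _ _ _ _ (by omega) (by simp only; omega) (by simp only)
          · rw [hemit, if_neg (by omega)]
            rw [endBlock_pos t1 n (by omega), JL_appendNumber]
            rw [endBlock_nonpos t1 0 (by omega)] at hJ
            rw [hJ]; simp
        · have hgap : px + 1 < xs := by omega
          have h1 := stepA_same_row_gap t1 c px (xs, y) hgap
          refine ⟨pvA_appendNumber (pvA_endBlock t1 c).1 (xs - px - 1) "b", ?_, ?_⟩
          · rw [hexp, List.foldl_cons, h1, adjFold]
            exact stEq _ _ _ _ _ _ _ (by omega) (by simp only; omega) (by simp only)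
          · rw [hemit, if_pos (by omega)]
            rw [endBlock_pos _ n (by omega), JL_appendNumber, JL_appendNumber, hJ]
            simp
      · -- row change
        have hlt : py < y := by omega
        have hsp := splitStep t1 c px py (xs, y) (show 0 < (xs, y).2 - py by simp only; omega) hc
        have hemit : (pvB_emit (t2, py, px) (y, xs, n)).1
            = ((t2 ++ [pvB_tok (y - py) "$"])
                ++ (if xs > 0 then [pvB_tok xs "b"] else []))
                ++ [pvB_tok n "o"] := by
          by_cases hx : 0 < xs <;> simp [pvB_emit, hrow, hx]
        by_cases hx : xs = 0
        · have h1 := stepA_same_row_adj (pvA_appendNumber (pvA_endBlock t1 c).1 (y - py) "$")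
            0 (-1) (xs, y) (by omega)
          refine ⟨pvA_appendNumber (pvA_endBlock t1 c).1 (y - py) "$", ?_, ?_⟩
          · rw [hexp, List.foldl_cons, hsp, h1, adjFold]
            exact stEq _ _ _ _ _ _ _ (by omega) (by simp only; omega) (by simp only)
          · rw [hemit, if_neg (by omega)]
            rw [endBlock_pos _ n (by omega), JL_appendNumber, JL_appendNumber, hJ]
            simp
        · have hxpos : 0 < xs := by omega
          have h1 := stepA_same_row_gap (pvA_appendNumber (pvA_endBlock t1 c).1 (y - py) "$")
            0 (-1) (xs, y) (by omega)
          refine ⟨pvA_appendNumber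
              (pvA_endBlock (pvA_appendNumber (pvA_endBlock t1 c).1 (y - py) "$") 0).1
              (xs - (-1) - 1) "b", ?_, ?_⟩
          · rw [hexp, List.foldl_cons, hsp, h1, adjFold]
            exact stEq _ _ _ _ _ _ _ (by omega) (by simp only; omega) (by simp only)
          · rw [hemit, if_pos hxpos]
            rw [endBlock_pos _ n (by omega), JL_appendNumber,
              endBlock_nonpos _ 0 (by omega), JL_appendNumber, JL_appendNumber, hJ]
            have hxx : xs - (-1) - 1 = xs := by ring
            rw [hxx]
            simp
    obtain ⟨T, hT, hTJ⟩ := key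
    have hemitState : pvB_emit (t2, py, px) (y, xs, n)
        = ((pvB_emit (t2, py, px) (y, xs, n)).1, y, xs + n - 1) := by
      by_cases hrow : y = py <;>
        simp [pvB_emit, hrow]
    obtain ⟨st, hst, hstJ⟩ := ih T ((pvB_emit (t2, py, px) (y, xs, n)).1) n (xs + n - 1) y
      hTJ (by omega) hch' (fun r hr => hall r (by simp [hr]))
      (by
        cases rs' with
        | nil => simp
        | cons b t =>
          intro r' hr'
          simp only [List.head?_cons, Option.mem_def, Option.some.injEq] at hr'
          subst hr'
          have hR : RunLt (y, xs, n) b := (List.isChain_cons_cons.mp hch).1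
          unfold RunLt at hR
          simp only at hR
          constructor
          · omega
          · intro hb
            constructor
            · omega
            · right; omega)
    refine ⟨st, ?_, ?_⟩
    · rw [List.flatMap_cons, List.foldl_append, hT, hst]
    · rw [List.foldl_cons, hemitState]
      rw [hemitState] at hstJ
      exact hstJ.trans (by rw [← hemitState])

-- sorted2 of an already strictly lex-sorted list
lemma sorted2_eq_self :
    ∀ (xs : List (Int × Int)),
    xs.Pairwise (fun a b => a.1 < b.1 ∨ (a.1 = b.1 ∧ a.2 < b.2)) →
    PySem.List.sorted2 xs Prod.fst Prod.snd = xs := by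
  intro xs
  induction xs using List.reverseRecOn with
  | nil => intro _; rfl
  | append_singleton l x ih =>
    intro hp
    have hpl : l.Pairwise (fun a b : Int × Int => a.1 < b.1 ∨ (a.1 = b.1 ∧ a.2 < b.2)) :=
      hp.sublist (List.sublist_append_left _ _)
    have hlx : ∀ y ∈ l, y.1 < x.1 ∨ (y.1 = x.1 ∧ y.2 < x.2) := by
      intro y hy
      have := List.pairwise_append.mp hp
      exact this.2.2 y hy x (by simp)
    have hIH := ih hpl
    simp only [PySem.List.sorted2, Bool.false_eq_true, if_false] at hIH ⊢
    rw [List.foldl_append, hIH]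
    simp only [List.foldl_cons, List.foldl_nil]
    apply PySem.List.insertBy_of_forall_not_before
    intro y hy
    rcases hlx y hy with h | ⟨h1, h2⟩ <;> simp <;> omega

lemma sorted_of_chain : ∀ cells : List (Int × Int),
    List.IsChain (fun a b : Int × Int => a.2 < b.2 ∨ (a.2 = b.2 ∧ a.1 < b.1))
      cells → pvB_sorted cells = true := by
  intro cells
  induction cells with
  | nil => intro _; rfl
  | cons a t ih =>
    intro hch
    cases t with
    | nil => rfl
    | cons b t' =>
      obtain ⟨hab, hch'⟩ := List.isChain_cons_cons.mp hch
      have hrest := ih hch'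
      simp only [pvB_sorted, List.tail_cons, List.zip_cons_cons, List.all_cons,
        Bool.and_eq_true] at hrest ⊢
      refine ⟨?_, hrest⟩
      rcases hab with h | ⟨h1, h2⟩ <;> simp <;> omega

-- ===== VERDICT helper: the main equivalence =====
theorem to_rle_spec : Claim_equal_to_rle := by
  intro cells _ hpre
  obtain ⟨hne, hchain⟩ := hpre
  unfold Spec_to_rle
  obtain ⟨c0, cells_t, rfl⟩ : ∃ c t, cells = c :: t := by
    cases cells with
    | nil => exact absurd rfl hne
    | cons c t => exact ⟨c, t, rfl⟩
  obtain ⟨xm, hxm⟩ : ∃ xm, PySem.List.min? (((c0 :: cells_t).map Prod.fst)) (fun v => v) = some xm := by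
    rcases h : PySem.List.min? ((c0 :: cells_t).map Prod.fst) (fun v => v) with _ | xm
    · exact absurd ((PySem.List.min?_eq_none_iff _ _).mp h) (by simp)
    · exact ⟨xm, rfl⟩
  obtain ⟨ym, hym⟩ : ∃ ym, PySem.List.min? (((c0 :: cells_t).map Prod.snd)) (fun v => v) = some ym := by
    rcases h : PySem.List.min? ((c0 :: cells_t).map Prod.snd) (fun v => v) with _ | ym
    · exact absurd ((PySem.List.min?_eq_none_iff _ _).mp h) (by simp)
    · exact ⟨ym, rfl⟩
  set x0 := xm - PySem.Int.mod xm 2 with hx0def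
  set y0 := ym - PySem.Int.mod ym 2 with hy0def
  set cs := (c0 :: cells_t).map (fun c => (c.1 - x0, c.2 - y0)) with hcs
  -- coordinates of the shifted cells are nonnegative
  have hnonneg : ∀ p ∈ cs, 0 ≤ p.1 ∧ 0 ≤ p.2 := by
    intro p hp
    rw [hcs] at hp
    obtain ⟨q, hq, rfl⟩ := List.mem_map.mp hp
    have hminx : xm ≤ q.1 :=
      PySem.List.min?_isMin hxm q.1 (List.mem_map.mpr ⟨q, hq, rfl⟩)
    have hminy : ym ≤ q.2 :=
      PySem.List.min?_isMin hym q.2 (List.mem_map.mpr ⟨q, hq, rfl⟩)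
    have hmx : 0 ≤ PySem.Int.mod xm 2 := PySem.Int.mod_nonneg _ (by norm_num)
    have hmy : 0 ≤ PySem.Int.mod ym 2 := PySem.Int.mod_nonneg _ (by norm_num)
    constructor <;> simp only [hx0def, hy0def] <;> omega
  -- the shift preserves the strict (y, x) order
  have hchain' : List.IsChain Lex2 cs := by
    rw [hcs, List.isChain_map]
    refine hchain.imp ?_
    intro a b h
    unfold Lex2
    rcases h with h | ⟨h1, h2⟩
    · left; simp; omega
    · right; constructor <;> simp <;> omega
  have hpair : List.Pairwise Lex2 cs := pairwise_of_chain lex2_trans cs hchain'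
  have hnodup : cs.Nodup := by
    refine hpair.imp ?_
    intro a b h he
    unfold Lex2 at h
    subst he
    omega
  have halive : PySem.Set.ofList cs = cs := PySem.Set.ofList_eq_self_of_nodup cs hnodup
  -- the runs decomposition of cs
  obtain ⟨d0, cs_t, hcse⟩ : ∃ d t, cs = d :: t := by
    cases hh : cs with
    | nil => rw [hcs] at hh; simp at hh
    | cons d t => exact ⟨d, t, rfl⟩
  have hch0 : List.IsChain Lex2 ((d0.1 + 1 - 1, d0.2) :: cs_t) := by
    have : (d0.1 + 1 - 1, d0.2) = d0 := by
      have h : d0.1 + 1 - 1 = d0.1 := by omega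
      rw [h]
    rw [this, ← hcse]; exact hchain'
  obtain ⟨hflat, hcrs, _, hall1⟩ := runsGo_spec cs_t d0.2 d0.1 1 le_rfl hch0
  set rs := pvRunsGo d0.2 d0.1 1 cs_t with hrs
  have hflat' : rs.flatMap pvExpand = cs := by
    rw [hflat]
    have : (List.range (1 : Int).toNat).map (fun k : Nat => (d0.1 + (k : Int), d0.2)) = [d0] := by
      simp
    rw [this, hcse]
    simp
  have hprs : List.Pairwise RunLt rs := runs_pairwise rs hall1 hcrs
  -- membership characterisation
  have memC : ∀ a b : Int, (a, b) ∈ cs ↔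
      ∃ r ∈ rs, b = r.1 ∧ r.2.1 ≤ a ∧ a < r.2.1 + r.2.2 := by
    intro a b
    rw [← hflat', List.mem_flatMap]
    constructor
    · rintro ⟨r, hr, hm⟩
      exact ⟨r, hr, (mem_expand a b r).mp hm⟩
    · rintro ⟨r, hr, hm⟩
      exact ⟨r, hr, (mem_expand a b r).mpr hm⟩
  -- each run's start/interior/end facts
  have hrunmem : ∀ r ∈ rs, (r.2.1, r.1) ∈ cs := by
    intro r hr
    rw [memC]
    exact ⟨r, hr, rfl, le_rfl, by have := hall1 r hr; omega⟩
  have hrunpos : ∀ r ∈ rs, 1 ≤ r.2.2 ∧ 0 ≤ r.2.1 ∧ 0 ≤ r.1 := by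
    intro r hr
    have := hnonneg (r.2.1, r.1) (hrunmem r hr)
    exact ⟨hall1 r hr, this.1, this.2⟩
  have hfacts : ∀ r ∈ rs, 1 ≤ r.2.2 ∧ (r.2.1 - 1, r.1) ∉ cs ∧
      (∀ k : Int, 0 ≤ k → k < r.2.2 → (r.2.1 + k, r.1) ∈ cs) ∧
      (r.2.1 + r.2.2, r.1) ∉ cs ∧ (r.2.2 - 1).toNat ≤ cs.length := by
    intro r hr
    have hn := hall1 r hr
    refine ⟨hn, ?_, ?_, ?_, ?_⟩
    · intro hmem
      obtain ⟨r', hr', hb, h1, h2⟩ := (memC _ _).mp hmem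
      have hn' := hall1 r' hr'
      rcases pairwise_rel_of_mem rs hprs r hr r' hr' with he | hR | hR
      · subst he; omega
      · unfold RunLt at hR; omega
      · unfold RunLt at hR; omega
    · intro k hk1 hk2
      rw [memC]
      exact ⟨r, hr, rfl, by omega, by omega⟩
    · intro hmem
      obtain ⟨r', hr', hb, h1, h2⟩ := (memC _ _).mp hmem
      have hn' := hall1 r' hr'
      rcases pairwise_rel_of_mem rs hprs r hr r' hr' with he | hR | hR
      · subst he; omega
      · unfold RunLt at hR; omega
      · unfold RunLt at hR; omega
    · have hsub := expand_sublist rs r hr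
      rw [hflat'] at hsub
      have hlen := hsub.length_le
      have : (pvExpand r).length = r.2.2.toNat := by
        simp [pvExpand]
      omega
  -- A's side
  have hAstate := AtoEmit rs [""] [] 0 (-1) 0
    (by rw [endBlock_nonpos _ 0 (by omega)]; simp [JL])
    le_rfl hcrs hrunpos
    (by
      intro r hr
      have hr'mem : r ∈ rs := List.mem_of_mem_head? hr
      have := hrunpos r hr'mem
      exact ⟨this.2.2, fun h0 => ⟨by omega, Or.inl rfl⟩⟩)
  obtain ⟨st, hstA, hstJ⟩ := hAstate
  -- B's side: the sorted set IS the shifted list, and the scan returns rs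
  have hswap : (cs.map (fun c => (c.2, c.1))).Pairwise
      (fun a b : Int × Int => a.1 < b.1 ∨ (a.1 = b.1 ∧ a.2 < b.2)) := by
    rw [List.pairwise_map]
    refine hpair.imp ?_
    intro a b h
    unfold Lex2 at h
    simpa using h
  have hsorted : PySem.List.sorted2 (cs.map (fun c => (c.2, c.1))) Prod.fst Prod.snd
      = cs.map (fun c => (c.2, c.1)) := sorted2_eq_self _ hswap
  have hBruns : pvB_runs cs (cs.map (fun c => (c.2, c.1))) = rs := by
    unfold pvB_runs
    rw [show cs.map (fun c => (c.2, c.1))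
        = (rs.flatMap pvExpand).map (fun c => (c.2, c.1)) from by rw [hflat']]
    rw [runsB_fold cs rs [] hfacts]
    simp
  -- assemble
  have hlb : pvLowerBound (c0 :: cells_t) = (x0, y0) := by
    unfold pvLowerBound pvEvenFloor
    rw [hxm, hym]
    simp [hx0def, hy0def]
  have hA : to_rle (c0 :: cells_t) = PySem.Str.join "" (pvA_endBlock st.1 st.2.1).1 := by
    unfold to_rle
    simp only [hlb]
    rw [show (c0 :: cells_t).map (fun c => (c.1 - (x0, y0).1, c.2 - (x0, y0).2)) = cs from by
      rw [hcs]]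
    rw [← hflat', hstA]
  have hB : to_rle_alt (c0 :: cells_t)
      = PySem.Str.join "" ((rs.foldl pvB_emit ([], 0, -1)).1) := by
    unfold to_rle_alt
    rw [sorted_of_chain _ hchain]
    simp only [not_true, if_false, hxm, hym]
    rw [show (c0 :: cells_t).map
          (fun c => (c.1 - (xm - PySem.Int.mod xm 2), c.2 - (ym - PySem.Int.mod ym 2))) = cs from by
      rw [hcs, hx0def, hy0def]]
    rw [halive, hsorted, hBruns]
  rw [hA, hB, join_eq_ofList, join_eq_ofList, hstJ]
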